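-- pv_equiv track=rewrite | github.com/gijo57/tira-syksy-2021 | week_2/bothsame.py | count
-- ===== SOURCE A (Python) =====
-- def count(s):
--     substrings = 0
--     starts = {}
--     for i in range(len(s)):
--         if s[i] in starts:
--             starts[s[i]] += 1
--         else:
--             starts[s[i]] = 1
--         substrings += starts[s[i]]
--     return substrings
-- ===== SOURCE B (Python) =====
-- def count(s):
--     freq = {}
--     for ch in s:
--         freq[ch] = freq.get(ch, 0) + 1
--     return sum(n * (n + 1) // 2 for n in freq.values())
-- ===== Notes on version B (the rewrite author's own statement) =====
-- stated objective: simpler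
-- what changed: Replaces A's per-position incremental accumulation (adding the running count at each index) with a single frequency pass followed by the closed-form triangular sum n*(n+1)//2 per distinct character, so per-character work in the hot loop shrinks to one dict update.
import Mathlib
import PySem

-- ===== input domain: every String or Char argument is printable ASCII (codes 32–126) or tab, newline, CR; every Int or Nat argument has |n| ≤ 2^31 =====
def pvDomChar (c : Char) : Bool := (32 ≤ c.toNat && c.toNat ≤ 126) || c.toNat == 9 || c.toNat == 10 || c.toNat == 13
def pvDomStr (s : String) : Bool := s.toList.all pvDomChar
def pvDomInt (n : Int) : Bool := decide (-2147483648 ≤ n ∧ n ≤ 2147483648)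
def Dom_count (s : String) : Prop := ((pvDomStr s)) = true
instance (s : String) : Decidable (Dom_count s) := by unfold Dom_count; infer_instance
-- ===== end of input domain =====

-- B replaces A's per-position incremental accumulation with one frequency pass plus the
-- closed-form triangular sum n*(n+1)//2 per distinct character (objective: simpler).

-- ===== PORT A =====
-- A walks the string keeping a running per-character counter dict and adds the updated
-- count of the current character to the accumulator at every position.
def count (s : String) : Int :=
  (s.toList.foldl
    (fun (st : PySem.Dict Char Int × Int) c =>
      let starts := if st.1.contains c then st.1.modify c 0 (· + 1) else st.1.insert c 1
      (starts, st.2 + starts.getD c 0))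
    (PySem.Dict.empty, 0)).2

-- ===== PORT B =====
-- tri n = n * (n + 1) // 2, Python's integer floor division
def tri (n : Int) : Int := PySem.Int.floordiv (n * (n + 1)) 2

def count_alt (s : String) : Int :=
  let freq := s.toList.foldl
    (fun (d : PySem.Dict Char Int) c => d.insert c (d.getD c 0 + 1)) PySem.Dict.empty
  (freq.values.map tri).sum

-- ===== PRECONDITION & SPEC =====
def Spec_count (s : String) (out : Int) : Prop := out = count_alt s
instance (s : String) (out : Int) : Decidable (Spec_count s out) := by unfold Spec_count; infer_instance

-- ===== CLAIM (what is proved, stated in full; the proofs are below) =====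
def Claim_equal_count : Prop := ∀ (s : String), Dom_count s → Spec_count s (count s)

-- ===== LEMMAS AND PROOFS =====

-- sum of tri over the stored counts of a dict
def Sval (d : PySem.Dict Char Int) : Int := (d.keys.map (fun k => tri (d.getD k 0))).sum

-- n*(n+1) is always even, so floor division is exact and tri satisfies the triangular recurrence
theorem tri_succ (n : Int) : tri (n + 1) = tri n + (n + 1) := by
  obtain ⟨t, ht⟩ := Int.even_mul_succ_self n
  have e1 : n * (n + 1) = 2 * t := by linarith
  have e2 : (n + 1) * ((n + 1) + 1) = 2 * (t + (n + 1)) := by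
    calc (n + 1) * ((n + 1) + 1) = n * (n + 1) + 2 * (n + 1) := by ring
      _ = 2 * t + 2 * (n + 1) := by rw [e1]
      _ = 2 * (t + (n + 1)) := by ring
  have h1 : tri n = t := by
    simp only [tri, PySem.Int.floordiv, e1]
    exact Int.mul_fdiv_cancel_left t (by norm_num)
  have h2 : tri (n + 1) = t + (n + 1) := by
    simp only [tri, PySem.Int.floordiv, e2]
    exact Int.mul_fdiv_cancel_left _ (by norm_num)
  omega

-- A's two-branch dict update is exactly the "insert current count + 1" step of B
theorem stepA_eq (d : PySem.Dict Char Int) (c : Char) :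
    (if d.contains c then d.modify c 0 (· + 1) else d.insert c 1) = d.insert c (d.getD c 0 + 1) := by
  by_cases h : d.contains c = true
  · simp [h, PySem.Dict.modify]
  · have h' : d.contains c = false := by simpa using h
    simp [h', PySem.Dict.getD_of_not_contains d 0 h']

-- adding δ to the image of one element of a Nodup list adds δ to the mapped sum
theorem sum_map_update (ks : List Char) (g : Char → Int) (c : Char) (δ : Int)
    (hnd : ks.Nodup) (hc : c ∈ ks) :
    (ks.map (fun k => if k = c then g k + δ else g k)).sum = (ks.map g).sum + δ := by
  induction ks with
  | nil => simp at hc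
  | cons x xs ih =>
    rcases List.mem_cons.mp hc with h | h
    · subst h
      have hx : c ∉ xs := (List.nodup_cons.mp hnd).1
      have hcong : ∀ k ∈ xs, (if k = c then g k + δ else g k) = g k := by
        intro k hk
        have : k ≠ c := fun e => hx (e ▸ hk)
        simp [this]
      simp only [List.map_cons, List.sum_cons, List.map_congr_left hcong, if_true]
      ring
    · have hxc : x ≠ c := by
        intro e; subst e; exact (List.nodup_cons.mp hnd).1 h
      simp only [List.map_cons, List.sum_cons, if_neg hxc,
        ih (List.nodup_cons.mp hnd).2 h]
      ring

theorem Sval_insert (d : PySem.Dict Char Int) (c : Char) (hnd : d.keys.Nodup) :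
    Sval (d.insert c (d.getD c 0 + 1)) = Sval d + (d.getD c 0 + 1) := by
  have hget : ∀ k, (d.insert c (d.getD c 0 + 1)).getD k 0
      = if k = c then d.getD c 0 + 1 else d.getD k 0 :=
    fun k => PySem.Dict.getD_insert d c k (d.getD c 0 + 1) 0
  by_cases h : d.contains c = true
  · have hkeys : (d.insert c (d.getD c 0 + 1)).keys = d.keys :=
      PySem.Dict.keys_insert_of_contains d (d.getD c 0 + 1) h
    have hcmem : c ∈ d.keys := (PySem.Dict.contains_iff_mem_keys d c).mp h
    unfold Sval
    rw [hkeys]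
    have hcong : ∀ k ∈ d.keys, tri ((d.insert c (d.getD c 0 + 1)).getD k 0)
        = (fun k => if k = c then tri (d.getD k 0) + (d.getD c 0 + 1) else tri (d.getD k 0)) k := by
      intro k _
      by_cases hk : k = c
      · subst hk
        simp only [hget k, if_true, tri_succ]
      · simp only [hget k, if_neg hk]
    rw [List.map_congr_left hcong,
      sum_map_update d.keys (fun k => tri (d.getD k 0)) c (d.getD c 0 + 1) hnd hcmem]
  · have h' : d.contains c = false := by simpa using h
    have hkeys : (d.insert c (d.getD c 0 + 1)).keys = d.keys ++ [c] :=
      PySem.Dict.keys_insert_of_not_contains d (d.getD c 0 + 1) h'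
    have hcmem : c ∉ d.keys := fun hc => by
      simp [(PySem.Dict.contains_iff_mem_keys d c).mpr hc] at h'
    have hm0 : d.getD c 0 = 0 := PySem.Dict.getD_of_not_contains d 0 h'
    unfold Sval
    rw [hkeys, List.map_append, List.sum_append]
    have hcong : ∀ k ∈ d.keys, tri ((d.insert c (d.getD c 0 + 1)).getD k 0) = tri (d.getD k 0) := by
      intro k hk
      have : k ≠ c := fun e => hcmem (e ▸ hk)
      rw [hget k, if_neg this]
    have h1 : tri 1 = 1 := by decide
    rw [List.map_congr_left hcong]
    simp [hm0, h1]

theorem nodup_step (d : PySem.Dict Char Int) (c : Char) (hnd : d.keys.Nodup) :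
    (d.insert c (d.getD c 0 + 1)).keys.Nodup := PySem.Dict.nodup_keys_insert d c _ hnd

-- main loop invariant: A's accumulator equals the tri-sum gained by the counter pass
theorem loop_inv (l : List Char) :
    ∀ (d : PySem.Dict Char Int) (a : Int), d.keys.Nodup →
    (l.foldl
      (fun (st : PySem.Dict Char Int × Int) c =>
        let starts := if st.1.contains c then st.1.modify c 0 (· + 1) else st.1.insert c 1
        (starts, st.2 + starts.getD c 0)) (d, a)).2
      = a + Sval (l.foldl (fun (d : PySem.Dict Char Int) c => d.insert c (d.getD c 0 + 1)) d)
          - Sval d := by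
  induction l with
  | nil => intro d a _; simp
  | cons c l ih =>
    intro d a hnd
    have hstep := stepA_eq d c
    simp only [List.foldl_cons, hstep]
    rw [ih (d.insert c (d.getD c 0 + 1)) _ (nodup_step d c hnd),
      Sval_insert d c hnd, PySem.Dict.getD_insert_self]
    ring

-- ===== VERDICT (by name: the statement is the Claim_ definition above) =====
theorem count_spec : Claim_equal_count := by
  intro s _
  unfold Spec_count count count_alt
  rw [loop_inv s.toList PySem.Dict.empty 0 PySem.Dict.nodup_keys_empty]
  have hS0 : Sval PySem.Dict.empty = 0 := by simp [Sval, PySem.Dict.keys_empty]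
  set F := s.toList.foldl (fun (d : PySem.Dict Char Int) c => d.insert c (d.getD c 0 + 1))
      PySem.Dict.empty with hF
  have hndF : F.keys.Nodup := by
    rw [hF, PySem.Dict.foldl_insert_getD_add_one_eq_counter]
    exact PySem.Dict.nodup_keys_counter s.toList
  have hv : F.values = F.keys.map (fun k => F.getD k 0) :=
    PySem.Dict.values_eq_map_keys F hndF 0
  rw [hS0]
  show 0 + Sval F - 0 = (List.map tri F.values).sum
  rw [hv]
  simp only [Sval, List.map_map, Function.comp_def]
  ring
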